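-- pv_equiv track=rewrite | github.com/TheYonk/yonk-robo-codemonkey | src/yonk_code_robomonkey/doc_validity/claim_verifier.py | _is_test_file
-- ===== SOURCE A (Python) =====
-- def _is_test_file(file_path: str) -> bool:
--     """Check if a file path is a test file."""
--     path_lower = file_path.lower()
--     test_indicators = [
--         '/tests/', '/test/', '/__tests__/',
--         '.test.', '.spec.', '_test.', '_spec.',
--         'test_', 'spec_'
--     ]
--     return any(indicator in path_lower for indicator in test_indicators)
-- ===== SOURCE B (Python) =====
-- _TEST_INDICATORS = [
--     '/tests/', '/test/', '/__tests__/',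
--     '.test.', '.spec.', '_test.', '_spec.',
--     'test_', 'spec_'
-- ]
--
-- def _is_test_file(file_path: str) -> bool:
--     """Check if a file path is a test file (single left-to-right scan)."""
--     p = file_path.lower()
--     for i in range(len(p)):
--         for ind in _TEST_INDICATORS:
--             if p.startswith(ind, i):
--                 return True
--     return False
-- ===== Notes on version B (the rewrite author's own statement) =====
-- stated objective: alternative
-- what changed: Replaces any() over per-indicator substring-containment scans with one position-major left-to-right scan of the lowercased path, testing each position with startswith against the indicator list.
import Mathlib
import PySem

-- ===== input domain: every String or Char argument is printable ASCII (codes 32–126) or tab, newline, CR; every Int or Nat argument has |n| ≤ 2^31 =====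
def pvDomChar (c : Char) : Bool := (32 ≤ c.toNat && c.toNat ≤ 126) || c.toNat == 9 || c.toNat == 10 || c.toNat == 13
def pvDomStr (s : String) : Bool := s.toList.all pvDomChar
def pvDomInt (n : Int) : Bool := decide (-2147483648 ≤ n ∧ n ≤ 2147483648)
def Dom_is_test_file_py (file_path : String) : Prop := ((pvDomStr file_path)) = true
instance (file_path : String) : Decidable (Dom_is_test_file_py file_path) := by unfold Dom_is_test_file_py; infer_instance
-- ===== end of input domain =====

-- B replaces A's indicator-major any()/'in' scans with one position-major startswith scan; alternative, same cost.

-- ===== PORT A =====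
def pvIndicators : List String :=
  ["/tests/", "/test/", "/__tests__/",
   ".test.", ".spec.", "_test.", "_spec.",
   "test_", "spec_"]

def is_test_file_py (file_path : String) : Bool :=
  let path_lower := PySem.Str.lower file_path
  pvIndicators.any (fun indicator => PySem.Str.isIn indicator path_lower)

-- ===== PORT B =====
-- the 'for i in range(len(p))' loop: recursion over the suffixes of p
def pvScan : List Char → Bool
  | [] => false
  | c :: rest =>
    if pvIndicators.any (fun ind => PySem.Chars.startswith (c :: rest) ind.toList) then true
    else pvScan rest

def is_test_file_py_alt (file_path : String) : Bool :=
  pvScan (PySem.Str.lower file_path).toList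

-- ===== PRECONDITION & SPEC =====
def Spec_is_test_file_py (file_path : String) (out : Bool) : Prop := out = is_test_file_py_alt file_path
instance (file_path : String) (out : Bool) : Decidable (Spec_is_test_file_py file_path out) := by unfold Spec_is_test_file_py; infer_instance

-- ===== CLAIM (what is proved, stated in full; the proofs are below) =====
def Claim_equal_is_test_file_py : Prop := ∀ (file_path : String), Dom_is_test_file_py file_path → Spec_is_test_file_py file_path (is_test_file_py file_path)

-- ===== LEMMAS AND PROOFS =====
lemma pvScan_eq_any_isIn (s : List Char) :
    pvScan s = pvIndicators.any (fun ind => PySem.Chars.isIn ind.toList s) := by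
  induction s with
  | nil => decide
  | cons c rest ih =>
    rw [pvScan, ih, Bool.eq_iff_iff]
    by_cases h : pvIndicators.any (fun ind => PySem.Chars.startswith (c :: rest) ind.toList) = true
    · simp only [h, if_true, true_iff]
      rcases List.any_eq_true.mp h with ⟨ind, hmem, hsw⟩
      exact List.any_eq_true.mpr ⟨ind, hmem,
        (PySem.Chars.isIn_iff_infix _ _).mpr ((PySem.Chars.startswith_iff _ _ |>.mp hsw).isInfix)⟩
    · simp only [h]
      constructor
      · rintro h'
        rcases List.any_eq_true.mp h' with ⟨ind, hmem, hin⟩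
        exact List.any_eq_true.mpr ⟨ind, hmem,
          (PySem.Chars.isIn_iff_infix _ _).mpr (List.infix_cons ((PySem.Chars.isIn_iff_infix _ _).mp hin))⟩
      · rintro h'
        rcases List.any_eq_true.mp h' with ⟨ind, hmem, hin⟩
        rcases List.infix_cons_iff.mp ((PySem.Chars.isIn_iff_infix _ _).mp hin) with hp | hi
        · exact absurd (List.any_eq_true.mpr ⟨ind, hmem,
            (PySem.Chars.startswith_iff _ _).mpr hp⟩) h
        · exact List.any_eq_true.mpr ⟨ind, hmem, (PySem.Chars.isIn_iff_infix _ _).mpr hi⟩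

-- ===== VERDICT (by name: the statement is the Claim_ definition above) =====
theorem is_test_file_py_spec : Claim_equal_is_test_file_py := by
  intro file_path _
  unfold Spec_is_test_file_py is_test_file_py is_test_file_py_alt
  rw [pvScan_eq_any_isIn]
  simp [PySem.Str.isIn_eq]
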